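-- pv_equiv track=rewrite | github.com/Vince-Liuss/literary_style_model | data_analysis/Unified_analysis.py | organize_chunks_by_author
-- ===== SOURCE A (Python) =====
-- from collections import defaultdict
--
-- def organize_chunks_by_author(split_data):
--     """Organize chunks by author and title with deterministic ordering"""
--     chunks_by_author = defaultdict(lambda: defaultdict(list))
--
--     # Sort data for deterministic ordering
--     sorted_data = sorted(
--         split_data, key=lambda x: (x["author"], x["title"], x["chunk_label"])
--     )
--
--     for chunk in sorted_data:
--         author = chunk["author"]
--         title = chunk["title"]
--         chunks_by_author[author][title].append(chunk)
--
--     return chunks_by_author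
-- ===== SOURCE B (Python) =====
-- def organize_chunks_by_author(split_data):
--     """Organize chunks by author and title with deterministic ordering"""
--     result = {}
--     for author in sorted({c["author"] for c in split_data}):
--         group = [c for c in split_data if c["author"] == author]
--         inner = {}
--         for title in sorted({c["title"] for c in group}):
--             inner[title] = sorted(
--                 (c for c in group if c["title"] == title),
--                 key=lambda c: c["chunk_label"],
--             )
--         result[author] = inner
--     return result
-- ===== Notes on version B (the rewrite author's own statement) =====
-- stated objective: alternative
-- what changed: Instead of globally sorting all chunks by the (author,title,chunk_label) triple and folding them into nested defaultdicts, B computes the sorted distinct authors, and per author the sorted distinct titles, and builds each inner group directly by filtering and sorting it by chunk_label alone.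
import Mathlib
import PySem

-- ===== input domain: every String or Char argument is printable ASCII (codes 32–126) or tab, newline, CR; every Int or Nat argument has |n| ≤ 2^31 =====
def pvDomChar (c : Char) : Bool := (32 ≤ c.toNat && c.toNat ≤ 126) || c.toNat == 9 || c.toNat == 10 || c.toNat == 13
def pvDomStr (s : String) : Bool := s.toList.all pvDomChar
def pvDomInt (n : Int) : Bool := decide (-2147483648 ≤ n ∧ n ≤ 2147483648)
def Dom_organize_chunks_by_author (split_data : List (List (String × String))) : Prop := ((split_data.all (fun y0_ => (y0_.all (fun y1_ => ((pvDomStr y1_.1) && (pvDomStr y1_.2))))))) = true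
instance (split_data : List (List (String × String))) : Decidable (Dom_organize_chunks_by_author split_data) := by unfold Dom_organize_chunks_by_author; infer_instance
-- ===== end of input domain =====

-- B restructures the computation (group-by-filter with local sorts instead of one global
-- triple-keyed sort folded into nested defaultdicts); same return value, no speed claim.

-- ===== PORT A =====
-- chunk["author"] / chunk["title"] / chunk["chunk_label"]; Pre_ guarantees the key is
-- present, so the default "" is never the result on admitted inputs (KeyError excluded by Pre_).
def pvAuthor (c : List (String × String)) : String := (PySem.Dict.mk c).getD "author" ""
def pvTitle (c : List (String × String)) : String := (PySem.Dict.mk c).getD "title" ""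
def pvLabel (c : List (String × String)) : String := (PySem.Dict.mk c).getD "chunk_label" ""
-- the Python sort key (x["author"], x["title"], x["chunk_label"]): a three-string tuple under
-- lexicographic comparison, modelled as the 3-element list (List String carries that order)
def pvKey (c : List (String × String)) : List String := [pvAuthor c, pvTitle c, pvLabel c]

def organize_chunks_by_author (split_data : List (List (String × String))) : List (String × List (String × List (List (String × String)))) :=
  let sorted_data := PySem.List.sorted split_data pvKey false
  let chunks_by_author : PySem.Dict String (PySem.Dict String (List (List (String × String)))) :=
    sorted_data.foldl
      (fun d chunk =>
        d.modify (pvAuthor chunk) PySem.Dict.empty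
          (fun inner => inner.modify (pvTitle chunk) [] (fun l => l ++ [chunk])))
      PySem.Dict.empty
  chunks_by_author.items.map (fun p => (p.1, p.2.items))

-- ===== PORT B =====
def organize_chunks_by_author_alt (split_data : List (List (String × String))) : List (String × List (String × List (List (String × String)))) :=
  let authors := PySem.List.sorted (PySem.Set.ofList (split_data.map pvAuthor)) (fun x => x) false
  let result : PySem.Dict String (PySem.Dict String (List (List (String × String)))) :=
    authors.foldl
      (fun r a =>
        let group := split_data.filter (fun c => pvAuthor c == a)
        let titles := PySem.List.sorted (PySem.Set.ofList (group.map pvTitle)) (fun x => x) false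
        let inner := titles.foldl
          (fun i t => i.insert t (PySem.List.sorted (group.filter (fun c => pvTitle c == t)) pvLabel false))
          PySem.Dict.empty
        r.insert a inner)
      PySem.Dict.empty
  result.items.map (fun p => (p.1, p.2.items))

-- ===== PRECONDITION & SPEC =====
-- Pre_ excludes exactly the chunks on which Python's chunk["author"/"title"/"chunk_label"] raises KeyError.
def Pre_organize_chunks_by_author (split_data : List (List (String × String))) : Prop :=
  ∀ c ∈ split_data, "author" ∈ c.map Prod.fst ∧ "title" ∈ c.map Prod.fst ∧ "chunk_label" ∈ c.map Prod.fst
instance (split_data : List (List (String × String))) : Decidable (Pre_organize_chunks_by_author split_data) := by unfold Pre_organize_chunks_by_author; infer_instance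

def pvWitness_organize_chunks_by_author : (List (List (String × String))) :=
  [[("author", "a"), ("title", "t"), ("chunk_label", "1")]]

def Spec_organize_chunks_by_author (split_data : List (List (String × String))) (out : List (String × List (String × List (List (String × String))))) : Prop := out = organize_chunks_by_author_alt split_data
instance (split_data : List (List (String × String))) (out : List (String × List (String × List (List (String × String))))) : Decidable (Spec_organize_chunks_by_author split_data out) := by
  unfold Spec_organize_chunks_by_author
  exact @instDecidableEqList _ (@instDecidableEqProd _ _ instDecidableEqString (@instDecidableEqList _ (@instDecidableEqProd _ _ instDecidableEqString (@instDecidableEqList _ (@instDecidableEqList _ (@instDecidableEqProd _ _ instDecidableEqString instDecidableEqString)))))) _ _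

-- ===== CLAIM (what is proved, stated in full; the proofs are below) =====
def Claim_equal_organize_chunks_by_author : Prop := ∀ (split_data : List (List (String × String))), Dom_organize_chunks_by_author split_data → Pre_organize_chunks_by_author split_data → Spec_organize_chunks_by_author split_data (organize_chunks_by_author split_data)

-- ===== LEMMAS AND PROOFS =====

-- ---- generic facts about PySem.List.sorted (stable insertion sort) ----

theorem pv_sorted_append_singleton {α κ : Type} [LinearOrder κ] (xs : List α) (x : α) (key : α → κ) :
    PySem.List.sorted (xs ++ [x]) key false
      = PySem.List.insertBy (fun a b => decide (key a < key b)) x (PySem.List.sorted xs key false) := by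
  simp [PySem.List.sorted, List.foldl_append]


theorem pv_insertBy_all_before {α : Type} (b : α → α → Bool) (x : α) (l : List α)
    (h : ∀ z ∈ l, b x z = true) : PySem.List.insertBy b x l = x :: l := by
  cases l with
  | nil => rfl
  | cons y ys => simp [PySem.List.insertBy, h y (by simp)]


theorem pv_filter_insertBy_neg {α : Type} (b : α → α → Bool) (p : α → Bool) (x : α) (l : List α)
    (hx : p x = false) : (PySem.List.insertBy b x l).filter p = l.filter p := by
  induction l with
  | nil => simp [PySem.List.insertBy, hx]
  | cons y ys ih =>
    by_cases hb : b x y = true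
    · simp [PySem.List.insertBy, hb, hx, List.filter_cons]
    · simp only [PySem.List.insertBy, Bool.not_eq_true] at hb ⊢
      simp [hb, List.filter_cons, ih]


theorem pv_filter_insertBy_pos {α κ : Type} [LinearOrder κ] (key : α → κ) (p : α → Bool) (x : α)
    (l : List α) (hx : p x = true) (hl : l.Pairwise (fun u v => key u ≤ key v)) :
    (PySem.List.insertBy (fun a b => decide (key a < key b)) x l).filter p
      = PySem.List.insertBy (fun a b => decide (key a < key b)) x (l.filter p) := by
  induction l with
  | nil => simp [PySem.List.insertBy, hx]
  | cons y ys ih =>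
    have hpw := List.pairwise_cons.mp hl
    by_cases hb : key x < key y
    · -- inserted in front
      simp only [PySem.List.insertBy, decide_eq_true_eq, if_pos hb]
      by_cases hpy : p y = true
      · simp [hx, hpy, PySem.List.insertBy, hb]
      · have hpy' : p y = false := by simpa using hpy
        have hall : ∀ z ∈ ys.filter p, decide (key x < key z) = true := by
          intro z hz
          have hz' := List.mem_of_mem_filter hz
          simpa using lt_of_lt_of_le hb (hpw.1 z hz')
        rw [List.filter_cons, if_pos hx, List.filter_cons, if_neg (by simp [hpy']),
          pv_insertBy_all_before _ _ _ hall]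
    · simp only [PySem.List.insertBy, decide_eq_true_eq, if_neg hb]
      by_cases hpy : p y = true
      · simp only [List.filter_cons, hpy, if_pos]
        rw [ih hpw.2]
        simp [PySem.List.insertBy, hb]
      · have hpy' : p y = false := by simpa using hpy
        rw [List.filter_cons, if_neg (by simp [hpy'])]
        rw [List.filter_cons, if_neg (by simp [hpy'])]
        exact ih hpw.2


theorem pv_filter_sorted {α κ : Type} [LinearOrder κ] (xs : List α) (key : α → κ) (p : α → Bool) :
    (PySem.List.sorted xs key false).filter p = PySem.List.sorted (xs.filter p) key false := by
  induction xs using List.reverseRecOn with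
  | nil => simp [PySem.List.sorted]
  | append_singleton xs x ih =>
    rw [pv_sorted_append_singleton, List.filter_append]
    by_cases hx : p x = true
    · rw [pv_filter_insertBy_pos key p x _ hx (PySem.List.sorted_pairwise xs key),
        List.filter_cons, if_pos hx, List.filter_nil, ih, pv_sorted_append_singleton]
    · have hx' : p x = false := by simpa using hx
      rw [pv_filter_insertBy_neg _ p x _ hx', ih, List.filter_cons, if_neg (by simp [hx']),
        List.filter_nil, List.append_nil]


theorem pv_insertBy_congr {α : Type} (b1 b2 : α → α → Bool) (x : α) (l : List α)
    (h : ∀ y ∈ l, b1 x y = b2 x y) : PySem.List.insertBy b1 x l = PySem.List.insertBy b2 x l := by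
  induction l with
  | nil => rfl
  | cons y ys ih =>
    simp only [PySem.List.insertBy, h y (by simp)]
    by_cases hb : b2 x y = true
    · simp [hb]
    · simp only [Bool.not_eq_true] at hb
      simp only [hb]
      rw [ih (fun z hz => h z (by simp [hz]))]


theorem pv_sorted_key_congr {α κ₁ κ₂ : Type} [LinearOrder κ₁] [LinearOrder κ₂]
    (xs : List α) (k1 : α → κ₁) (k2 : α → κ₂)
    (h : ∀ a ∈ xs, ∀ b ∈ xs, (k1 a < k1 b ↔ k2 a < k2 b)) :
    PySem.List.sorted xs k1 false = PySem.List.sorted xs k2 false := by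
  induction xs using List.reverseRecOn with
  | nil => rfl
  | append_singleton xs x ih =>
    rw [pv_sorted_append_singleton, pv_sorted_append_singleton,
      ih (fun a ha b hb => h a (by simp [ha]) b (by simp [hb]))]
    apply pv_insertBy_congr
    intro y hy
    have hy' : y ∈ xs := (PySem.List.mem_sorted xs k2 false y).mp hy
    simp [h x (by simp) y (by simp [hy'])]


-- ---- set(...) facts ----

theorem pv_foldl_add_sublist {α : Type} [BEq α] (l : List α) :
    ∀ s : List α, ∃ t, l.foldl PySem.Set.add s = s ++ t ∧ t.Sublist l := by
  induction l with
  | nil => intro s; exact ⟨[], by simp⟩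
  | cons x l ih =>
    intro s
    cases hc : s.contains x with
    | true =>
      obtain ⟨t, ht, hs⟩ := ih s
      refine ⟨t, ?_, hs.cons x⟩
      have : PySem.Set.add s x = s := by simp [PySem.Set.add, PySem.Set.contains, hc]
      simpa [this] using ht
    | false =>
      obtain ⟨t, ht, hs⟩ := ih (s ++ [x])
      refine ⟨x :: t, ?_, hs.cons₂ x⟩
      have : PySem.Set.add s x = s ++ [x] := by simp [PySem.Set.add, PySem.Set.contains, hc]
      simp only [List.foldl_cons, this]
      simpa using ht


theorem pv_ofList_sublist {α : Type} [BEq α] (l : List α) : (PySem.Set.ofList l).Sublist l := by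
  obtain ⟨t, ht, hs⟩ := pv_foldl_add_sublist l []
  rw [PySem.Set.ofList_eq_foldl, ht]
  simpa using hs


-- sorted({f(c) for c in xs}) computed from the already-sorted xs: first occurrences of f over
-- sorted xs ARE the sorted distinct values of f over xs (f monotone in the sort key)
theorem pv_setOfList_map_sorted {α κ : Type} [LinearOrder κ] [DecidableEq α] (xs : List α) (key : α → κ)
    (f : α → String) (hmono : ∀ a ∈ xs, ∀ b ∈ xs, key a ≤ key b → f a ≤ f b) :
    PySem.Set.ofList ((PySem.List.sorted xs key false).map f)
      = PySem.List.sorted (PySem.Set.ofList (xs.map f)) (fun x => x) false := by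
  refine Eq.symm (PySem.List.sorted_eq_of_perm_of_pairwise_lt _ _ _ ?_ ?_)
  · -- Perm
    apply (List.perm_ext_iff_of_nodup (PySem.Set.nodup_ofList _) (PySem.Set.nodup_ofList _)).mpr
    intro a
    simp only [PySem.Set.mem_ofList, List.mem_map]
    constructor
    · rintro ⟨c, hc, rfl⟩
      exact ⟨c, (PySem.List.mem_sorted xs key false c).mp hc, rfl⟩
    · rintro ⟨c, hc, rfl⟩
      exact ⟨c, (PySem.List.mem_sorted xs key false c).mpr hc, rfl⟩
  · -- Pairwise <
    have hle : ((PySem.List.sorted xs key false).map f).Pairwise (fun a b => a ≤ b) := by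
      rw [List.pairwise_map]
      apply List.Pairwise.imp_of_mem (l := PySem.List.sorted xs key false)
        (R := fun a b => key a ≤ key b)
      · intro a b ha hb hk
        exact hmono a ((PySem.List.mem_sorted xs key false a).mp ha)
          b ((PySem.List.mem_sorted xs key false b).mp hb) hk
      · exact PySem.List.sorted_pairwise xs key
    have hsub := pv_ofList_sublist ((PySem.List.sorted xs key false).map f)
    have hle' := hle.sublist hsub
    have hnd := PySem.Set.nodup_ofList ((PySem.List.sorted xs key false).map f)
    exact (hnd.and hle').imp (fun h => lt_of_le_of_ne h.2 h.1)


-- ---- grouping folds over dicts ----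

theorem pv_getD_foldl_modify_key {α ν : Type} (l : List α) (key : α → String) (d0 : ν)
    (f : α → ν → ν) (d : PySem.Dict String ν) (a : String) :
    (l.foldl (fun d c => d.modify (key c) d0 (f c)) d).getD a d0
      = (l.filter (fun c => key c == a)).foldl (fun v c => f c v) (d.getD a d0) := by
  induction l generalizing d with
  | nil => simp
  | cons c l ih =>
    rw [List.foldl_cons, ih, List.filter_cons]
    by_cases h : key c = a
    · rw [if_pos (by simp [h]), List.foldl_cons, PySem.Dict.getD_modify, if_pos h.symm, h]
    · rw [if_neg (by simp [h]), PySem.Dict.getD_modify, if_neg (fun hh => h hh.symm)]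


-- items of a grouping fold (modify with key) over the empty dict
theorem pv_items_foldl_modify_key {α ν : Type} (l : List α) (key : α → String) (d0 : ν)
    (f : α → ν → ν) :
    (l.foldl (fun d c => d.modify (key c) d0 (f c)) (PySem.Dict.empty : PySem.Dict String ν)).items
      = (PySem.Set.ofList (l.map key)).map
          (fun a => (a, (l.filter (fun c => key c == a)).foldl (fun v c => f c v) d0)) := by
  have hk := PySem.Dict.keys_foldl_modify_key l key d0 (fun _ c => f c) (PySem.Dict.empty : PySem.Dict String ν)
  have hnd := PySem.Dict.nodup_keys_foldl_modify_key l key d0 (fun _ c => f c)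
    (PySem.Dict.empty : PySem.Dict String ν) (by simp [PySem.Dict.keys_empty])
  rw [PySem.Dict.items_eq_map_keys _ hnd d0, hk]
  have : PySem.Set.update (PySem.Dict.empty : PySem.Dict String ν).keys (l.map key)
      = PySem.Set.ofList (l.map key) := by
    simp [PySem.Dict.keys_empty, PySem.Set.update, PySem.Set.ofList_eq_foldl]
  rw [this]
  apply List.map_congr_left
  intro a _
  rw [pv_getD_foldl_modify_key, PySem.Dict.getD_empty]


-- items of an insert fold over fresh distinct keys (B's loops)
theorem pv_items_foldl_insert_id {ν : Type} (l : List String) (v : String → ν) (hl : l.Nodup) :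
    (l.foldl (fun d a => d.insert a (v a)) (PySem.Dict.empty : PySem.Dict String ν)).items
      = l.map (fun a => (a, v a)) := by
  have := PySem.Dict.items_foldl_insert_fresh l (fun a => a) v
    (PySem.Dict.empty : PySem.Dict String ν)
    (fun a _ => PySem.Dict.contains_empty a) (by simpa using hl)
  simpa using this


-- ---- putting it together ----

theorem pv_key_lt_iff {c c' : List (String × String)} :
    pvKey c < pvKey c'
      ↔ (pvAuthor c < pvAuthor c' ∨ (pvAuthor c = pvAuthor c'
          ∧ (pvTitle c < pvTitle c' ∨ (pvTitle c = pvTitle c' ∧ pvLabel c < pvLabel c')))) := by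
  unfold pvKey
  simp [List.cons_lt_cons_iff]

theorem pv_key_le_author {c c' : List (String × String)} (h : pvKey c ≤ pvKey c') :
    pvAuthor c ≤ pvAuthor c' := by
  rcases lt_or_eq_of_le h with h | h
  · rcases pv_key_lt_iff.mp h with h | ⟨h, _⟩
    · exact le_of_lt h
    · exact le_of_eq h
  · unfold pvKey at h
    simp only [List.cons.injEq, and_true] at h
    exact le_of_eq h.1

theorem pv_key_le_title {c c' : List (String × String)} (ha : pvAuthor c = pvAuthor c')
    (h : pvKey c ≤ pvKey c') : pvTitle c ≤ pvTitle c' := by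
  rcases lt_or_eq_of_le h with h | h
  · rcases pv_key_lt_iff.mp h with h | ⟨_, h | ⟨h, _⟩⟩
    · exact absurd h (by simp [ha])
    · exact le_of_lt h
    · exact le_of_eq h
  · unfold pvKey at h
    simp only [List.cons.injEq, and_true] at h
    exact le_of_eq h.2.1

theorem pv_key_lt_iff_label {c c' : List (String × String)} (ha : pvAuthor c = pvAuthor c')
    (ht : pvTitle c = pvTitle c') : (pvKey c < pvKey c' ↔ pvLabel c < pvLabel c') := by
  rw [pv_key_lt_iff]
  simp [ha, ht]


-- the port elaborates `<` on List String through core instances, the generic lemmas through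
-- LinearOrder (List String); both decide the same relation, so the two sorts are equal
theorem pv_sorted_inst_congr {α κ : Type} (i1 : LT κ) (d1 : @DecidableLT κ i1)
    (i2 : LT κ) (d2 : @DecidableLT κ i2)
    (h : ∀ a b : κ, (@LT.lt κ i1 a b ↔ @LT.lt κ i2 a b)) (xs : List α) (key : α → κ) :
    @PySem.List.sorted α κ i1 d1 xs key false = @PySem.List.sorted α κ i2 d2 xs key false := by
  have hb : (fun (a b : α) => @decide _ (d1 (key a) (key b)))
      = (fun (a b : α) => @decide _ (d2 (key a) (key b))) := by
    funext a b
    exact decide_eq_decide.mpr (h (key a) (key b))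
  simp only [PySem.List.sorted, if_neg (by simp : ¬ false = true)]
  rw [hb]

theorem pv_mem_filter_author {a : String} {c : List (String × String)} {l : List (List (String × String))}
    (hc : c ∈ l.filter (fun c => pvAuthor c == a)) : pvAuthor c = a := by
  simpa using (List.mem_filter.mp hc).2

theorem pv_main (split_data : List (List (String × String))) :
    organize_chunks_by_author split_data = organize_chunks_by_author_alt split_data := by
  unfold organize_chunks_by_author organize_chunks_by_author_alt
  simp only []
  rw [pv_sorted_inst_congr
      (@List.instLT String String.LT')
      (fun a b => @List.decidableLT String instDecidableEqString String.LT' String.decidableLT' a b)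
      (@Preorder.toLT _ (@PartialOrder.toPreorder _ (@SemilatticeInf.toPartialOrder _
        (@Lattice.toSemilatticeInf _ (@DistribLattice.toLattice _
          (@instDistribLatticeOfLinearOrder _ List.instLinearOrder))))))
      (@LinearOrder.toDecidableLT _ List.instLinearOrder)
      (fun a b => Iff.rfl) split_data pvKey]
  rw [pv_items_foldl_modify_key]
  rw [pv_items_foldl_insert_id _ _
    (((PySem.List.sorted_perm _ _ _).nodup_iff).mpr (PySem.Set.nodup_ofList _))]
  rw [List.map_map, List.map_map]
  rw [pv_setOfList_map_sorted split_data pvKey pvAuthor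
    (fun a _ b _ h => pv_key_le_author h)]
  apply List.map_congr_left
  intro a _
  simp only [Function.comp]
  rw [pv_filter_sorted split_data pvKey (fun c => pvAuthor c == a)]
  rw [pv_items_foldl_modify_key]
  rw [pv_items_foldl_insert_id _ _
    (((PySem.List.sorted_perm _ _ _).nodup_iff).mpr (PySem.Set.nodup_ofList _))]
  rw [pv_setOfList_map_sorted (split_data.filter (fun c => pvAuthor c == a)) pvKey pvTitle
    (fun x hx y hy h => pv_key_le_title ((pv_mem_filter_author hx).trans (pv_mem_filter_author hy).symm) h)]
  apply congrArg
  apply List.map_congr_left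
  intro t _
  apply congrArg
  rw [PySem.List.foldl_append_singleton_eq_self, List.nil_append]
  rw [pv_filter_sorted _ pvKey (fun c => pvTitle c == t)]
  apply pv_sorted_key_congr
  intro x hx y hy
  have hax : pvAuthor x = a := pv_mem_filter_author (List.mem_of_mem_filter hx)
  have hay : pvAuthor y = a := pv_mem_filter_author (List.mem_of_mem_filter hy)
  have htx : pvTitle x = t := by simpa using (List.mem_filter.mp hx).2
  have hty : pvTitle y = t := by simpa using (List.mem_filter.mp hy).2
  exact pv_key_lt_iff_label (hax.trans hay.symm) (htx.trans hty.symm)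

theorem organize_chunks_by_author_spec : Claim_equal_organize_chunks_by_author := by
  intro split_data _ _
  exact pv_main split_data
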